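-- pv_equiv track=rewrite | github.com/RaikoPipe/PipeLab_legacy | interpret_path.py | change_standard_neighbors
-- ===== SOURCE A (Python) =====
-- def change_standard_neighbors(standardNeighbors, emptyList):
--     new_standard_neighbors = standardNeighbors
--     removetuples = []
--     for index, value in enumerate(emptyList):
--         removetuples.append((value+1, 0 ))
--         removetuples.append((-value-1, 0))
--         removetuples.append((0, value+1))
--         removetuples.append((0, -value-1))
--
--
--     for index, tuple in enumerate(removetuples):
--         if tuple in new_standard_neighbors:
--             new_standard_neighbors.remove(tuple)
--
--     return new_standard_neighbors
-- ===== SOURCE B (Python) =====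
-- def change_standard_neighbors(standardNeighbors, emptyList):
--     # Count each remove-tuple once, then filter in a single pass, decrementing
--     # counts: O(E + N) instead of A's O(E * N) scan-and-remove.
--     counts = {}
--     for value in emptyList:
--         for t in ((value + 1, 0), (-value - 1, 0), (0, value + 1), (0, -value - 1)):
--             counts[t] = counts.get(t, 0) + 1
--     kept = []
--     for t in standardNeighbors:
--         c = counts.get(t, 0)
--         if c:
--             counts[t] = c - 1
--         else:
--             kept.append(t)
--     standardNeighbors[:] = kept  # A mutates the input list in place; do the same
--     return standardNeighbors
-- ===== Notes on version B (the rewrite author's own statement) =====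
-- stated objective: faster
-- what changed: Instead of scanning the list with 'in'+'.remove' for every generated remove-tuple, B counts the remove-tuples in a dict once and keeps/drops elements in a single in-order pass that decrements counts.
import Mathlib
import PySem

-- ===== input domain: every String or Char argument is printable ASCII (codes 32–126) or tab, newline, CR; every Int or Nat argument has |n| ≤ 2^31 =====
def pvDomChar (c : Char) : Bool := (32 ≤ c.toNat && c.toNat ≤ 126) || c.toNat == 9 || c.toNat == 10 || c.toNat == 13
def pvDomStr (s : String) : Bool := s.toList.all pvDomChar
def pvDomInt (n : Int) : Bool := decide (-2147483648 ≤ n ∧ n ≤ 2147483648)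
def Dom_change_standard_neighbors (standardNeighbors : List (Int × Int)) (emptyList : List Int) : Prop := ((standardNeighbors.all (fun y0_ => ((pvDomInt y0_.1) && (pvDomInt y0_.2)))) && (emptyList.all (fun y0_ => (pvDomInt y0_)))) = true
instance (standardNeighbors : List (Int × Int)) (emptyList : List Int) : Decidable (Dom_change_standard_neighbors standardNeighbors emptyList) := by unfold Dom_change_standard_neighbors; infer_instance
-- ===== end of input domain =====

-- B replaces A's repeated `in`+`.remove` scans with one counting dict and a single
-- in-order filter pass (faster); both A and B mutate the input list in place in Python,
-- the equivalence proved here is about the return value.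


-- ===== PORT A =====
def change_standard_neighbors (standardNeighbors : List (Int × Int)) (emptyList : List Int) : List (Int × Int) :=
  -- new_standard_neighbors = standardNeighbors; build removetuples by appending
  let removetuples : List (Int × Int) := emptyList.foldl (fun acc value =>
      acc ++ [(value + 1, 0), (-value - 1, 0), (0, value + 1), (0, -value - 1)]) []
  -- for tuple in removetuples: if tuple in new_standard_neighbors: .remove(tuple)
  removetuples.foldl (fun ns t => if t ∈ ns then (PySem.List.remove? ns t).getD ns else ns)
    standardNeighbors

-- ===== PORT B =====
def change_standard_neighbors_alt (standardNeighbors : List (Int × Int)) (emptyList : List Int) : List (Int × Int) :=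
  -- counts[t] = counts.get(t, 0) + 1 over the four tuples of each value
  let counts : PySem.Dict (Int × Int) Int := emptyList.foldl (fun d value =>
      [(value + 1, (0 : Int)), (-value - 1, 0), ((0 : Int), value + 1), (0, -value - 1)].foldl
        (fun d t => d.modify t 0 (· + 1)) d) PySem.Dict.empty
  -- single pass: decrement a positive count, otherwise keep the element
  let fin := standardNeighbors.foldl
      (fun (st : PySem.Dict (Int × Int) Int × List (Int × Int)) t =>
        let c := st.1.getD t 0
        if c ≠ 0 then (st.1.insert t (c - 1), st.2)
        else (st.1, st.2 ++ [t]))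
      (counts, [])
  fin.2

-- ===== PRECONDITION & SPEC =====
def Spec_change_standard_neighbors (standardNeighbors : List (Int × Int)) (emptyList : List Int) (out : List (Int × Int)) : Prop := out = change_standard_neighbors_alt standardNeighbors emptyList
instance (standardNeighbors : List (Int × Int)) (emptyList : List Int) (out : List (Int × Int)) : Decidable (Spec_change_standard_neighbors standardNeighbors emptyList out) := by unfold Spec_change_standard_neighbors; infer_instance

-- ===== CLAIM (what is proved, stated in full; the proofs are below) =====
def Claim_equal_change_standard_neighbors : Prop := ∀ (standardNeighbors : List (Int × Int)) (emptyList : List Int), Dom_change_standard_neighbors standardNeighbors emptyList → Spec_change_standard_neighbors standardNeighbors emptyList (change_standard_neighbors standardNeighbors emptyList)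

-- ===== LEMMAS AND PROOFS =====

-- the four remove-tuples generated from one value (proof-side abbreviation)
def cnsQuads (value : Int) : List (Int × Int) :=
  [(value + 1, 0), (-value - 1, 0), (0, value + 1), (0, -value - 1)]

-- A's removal step
def cnsStepA (ns : List (Int × Int)) (t : Int × Int) : List (Int × Int) :=
  if t ∈ ns then (PySem.List.remove? ns t).getD ns else ns

-- B's counting dict (proof-side name for the dict port B builds)
def cnsDict (emptyList : List Int) : PySem.Dict (Int × Int) Int :=
  emptyList.foldl (fun d value =>
    (cnsQuads value).foldl (fun d t => d.modify t 0 (· + 1)) d) PySem.Dict.empty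

-- canonical form both programs reach: keep an element iff its count is exhausted
def cnsFilter (c : (Int × Int) → Nat) : List (Int × Int) → List (Int × Int)
  | [] => []
  | x :: xs =>
      if c x ≠ 0 then cnsFilter (fun t => if t = x then c t - 1 else c t) xs
      else x :: cnsFilter c xs

theorem cnsStepA_eq_erase (ns : List (Int × Int)) (t : Int × Int) :
    cnsStepA ns t = ns.erase t := by
  unfold cnsStepA
  by_cases h : t ∈ ns
  · simp [h, PySem.List.remove?_eq_some_erase ns t h]
  · simp [h, List.erase_of_not_mem h]

theorem cnsFilter_zero (xs : List (Int × Int)) : cnsFilter (fun _ => 0) xs = xs := by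
  induction xs with
  | nil => rfl
  | cons x xs ih => simp [cnsFilter, ih]

theorem cnsFilter_bump (r : Int × Int) (c : (Int × Int) → Nat) (xs : List (Int × Int)) :
    cnsFilter (fun t => if t = r then c t + 1 else c t) xs = cnsFilter c (xs.erase r) := by
  induction xs generalizing c with
  | nil => rfl
  | cons x xs ih =>
    by_cases hx : x = r
    · subst hx
      simp only [cnsFilter, List.erase_cons_head]
      have : (fun t => if t = x then (if t = x then c t + 1 else c t) - 1
                       else (if t = x then c t + 1 else c t)) = c := by
        funext t; by_cases h : t = x <;> simp [h]
      simp [this]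
    · have herase : (x :: xs).erase r = x :: xs.erase r := by
        rw [List.erase_cons]; simp [hx]
      have hbx : (if x = r then c x + 1 else c x) = c x := if_neg hx
      have hrx : ¬r = x := fun h => hx h.symm
      rw [herase]
      simp only [cnsFilter]
      rw [hbx]
      by_cases h0 : c x = 0
      · rw [if_neg (by simp [h0]), if_neg (by simp [h0])]
        exact congrArg _ (ih c)
      · rw [if_pos h0, if_pos h0]
        have : (fun t => if t = x then (if t = r then c t + 1 else c t) - 1
                         else (if t = r then c t + 1 else c t))
             = (fun t => if t = r then (if t = x then c t - 1 else c t) + 1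
                         else (if t = x then c t - 1 else c t)) := by
          funext t
          by_cases h1 : t = x
          · subst h1; simp [hx]
          · by_cases h2 : t = r <;> simp [h1, h2, hrx]
        rw [this, ih]

theorem cnsFoldA (rs : List (Int × Int)) (xs : List (Int × Int)) :
    rs.foldl cnsStepA xs = cnsFilter (fun t => rs.count t) xs := by
  induction rs generalizing xs with
  | nil => simp [cnsFilter_zero]
  | cons r rs ih =>
    simp only [List.foldl_cons, ih, cnsStepA_eq_erase]
    rw [← cnsFilter_bump r (fun t => rs.count t) xs]
    have : (fun t => (r :: rs).count t)
         = (fun t => if t = r then rs.count t + 1 else rs.count t) := by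
      funext t
      by_cases h : t = r
      · simp [h]
      · simp [h, Ne.symm h]
    rw [this]

-- B's filter loop equals cnsFilter of the dict's (nonnegative) counts
theorem cnsFoldB (xs : List (Int × Int)) (d : PySem.Dict (Int × Int) Int)
    (acc : List (Int × Int)) (hpos : ∀ t, 0 ≤ d.getD t 0) :
    (xs.foldl
      (fun (st : PySem.Dict (Int × Int) Int × List (Int × Int)) t =>
        let c := st.1.getD t 0
        if c ≠ 0 then (st.1.insert t (c - 1), st.2)
        else (st.1, st.2 ++ [t]))
      (d, acc)).2 = acc ++ cnsFilter (fun t => (d.getD t 0).toNat) xs := by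
  induction xs generalizing d acc with
  | nil => simp [cnsFilter]
  | cons x xs ih =>
    by_cases h0 : d.getD x 0 = 0
    · simp only [List.foldl_cons, h0, ne_eq, not_true_eq_false, if_false]
      rw [ih _ _ hpos]
      have hN : (d.getD x 0).toNat = 0 := by simp [h0]
      simp [cnsFilter, hN]
    · have hx1 : 1 ≤ d.getD x 0 := by have := hpos x; omega
      have hN : (d.getD x 0).toNat ≠ 0 := by omega
      simp only [List.foldl_cons, ne_eq, h0, not_false_eq_true, if_true]
      rw [ih _ _ (fun t => by
        rw [PySem.Dict.getD_insert]
        by_cases he : t = x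
        · simp [he]; omega
        · simp [he]; exact hpos t)]
      simp only [cnsFilter, hN, ne_eq, not_false_eq_true, if_true]
      congr 1
      have : (fun t => ((d.insert x (d.getD x 0 - 1)).getD t 0).toNat)
           = (fun t => if t = x then (d.getD t 0).toNat - 1 else (d.getD t 0).toNat) := by
        funext t
        rw [PySem.Dict.getD_insert]
        by_cases he : t = x <;> simp [he]
      rw [this]

-- B's counting dict holds exactly the multiset of A's removetuples
theorem cnsCounts (emptyList : List Int) (t : Int × Int) :
    (cnsDict emptyList).getD t 0 = ((emptyList.flatMap cnsQuads).count t : Int) := by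
  unfold cnsDict
  rw [← List.foldl_flatMap (f := cnsQuads)
      (g := fun (d : PySem.Dict (Int × Int) Int) t => d.modify t 0 (· + 1))]
  rw [PySem.Dict.getD_foldl_modify_add_one]
  simp [PySem.Dict.empty, PySem.Dict.getD, PySem.Dict.get?]

-- ===== VERDICT (by name: the statement is the Claim_ definition above) =====
theorem change_standard_neighbors_spec : Claim_equal_change_standard_neighbors := by
  intro s e _
  show change_standard_neighbors s e = change_standard_neighbors_alt s e
  have hA : change_standard_neighbors s e
      = (e.foldl (fun acc value => acc ++ cnsQuads value) []).foldl cnsStepA s := rfl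
  have hB : change_standard_neighbors_alt s e
      = (s.foldl
          (fun (st : PySem.Dict (Int × Int) Int × List (Int × Int)) t =>
            let c := st.1.getD t 0
            if c ≠ 0 then (st.1.insert t (c - 1), st.2)
            else (st.1, st.2 ++ [t]))
          (cnsDict e, [])).2 := rfl
  rw [hA, hB, PySem.List.foldl_append_eq_flatMap, List.nil_append, cnsFoldA,
      cnsFoldB s _ [] (fun t => by rw [cnsCounts]; exact Int.natCast_nonneg _),
      List.nil_append]
  have : (fun t => ((cnsDict e).getD t 0).toNat)
       = (fun t => (e.flatMap cnsQuads).count t) := by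
    funext t; rw [cnsCounts]; simp
  rw [this]
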